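-- pv_equiv track=rewrite | github.com/azbenoit/uni | CSE102/PROJECT/myjpeg.py | block_splitting
-- ===== SOURCE A (Python) =====
-- import math
--
-- def block_splitting(w, h, C, a = 8, b =8):
--     """
--     Takes a channel C
--     and yields all the 8 x 8 subblocks of the channel,
--     line by line, from left to right.
--     """
--     for i in range(math.ceil(h/(b))): #num of vertical blocks
--         for j in range(math.ceil(w/(a))): #num of horizontal blocks
--             #init matrix to be returned
--             mat = []
--             for _ in range(a):
--                 r = []
--                 for __ in range(b):
--                     r.append(None)
--                 mat.append(r)
--
--             #fill new matrix
--             for row in range(b*i, b*(i+1)):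
--                 for col in range(a*j, a*(j+1)):
--                     if row < h and col < w:
--                         mat[row-b*i][col-a*j] = C[row][col]
--                     elif col >=w and row < h: #partially empty rows
--                         mat[row-b*i][col-a*j] = mat[row-b*i][col-a*j-1]
--                     else: #fully empty rows
--                         mat[row-b*i][col-a*j] = mat[row-b*i-1][col-a*j]
--
--             yield mat
-- ===== SOURCE B (Python) =====
-- import math
--
-- def block_splitting(w, h, C, a = 8, b =8):
--     """
--     Yields all the a x b (padded) subblocks of channel C, line by line,
--     left to right, padding by clamping reads to the image edge instead of
--     A's iterative neighbour replication; fills column-major.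
--     """
--     for i in range(math.ceil(h/(b))):
--         for j in range(math.ceil(w/(a))):
--             mat = []
--             for _ in range(a):
--                 r = []
--                 for __ in range(b):
--                     r.append(None)
--                 mat.append(r)
--             for c in range(a):
--                 for r in range(b):
--                     mat[r][c] = C[min(b*i + r, h - 1)][min(a*j + c, w - 1)]
--             yield mat
-- ===== Notes on version B (the rewrite author's own statement) =====
-- stated objective: simpler
-- what changed: Each padded cell is filled directly by clamping the global coordinates to the image edge (C[min(b*i+r,h-1)][min(a*j+c,w-1)]), filled column-major, replacing A's three-way branch that replicates the left-neighbour / above-row cells already written into the block.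
import Mathlib
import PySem

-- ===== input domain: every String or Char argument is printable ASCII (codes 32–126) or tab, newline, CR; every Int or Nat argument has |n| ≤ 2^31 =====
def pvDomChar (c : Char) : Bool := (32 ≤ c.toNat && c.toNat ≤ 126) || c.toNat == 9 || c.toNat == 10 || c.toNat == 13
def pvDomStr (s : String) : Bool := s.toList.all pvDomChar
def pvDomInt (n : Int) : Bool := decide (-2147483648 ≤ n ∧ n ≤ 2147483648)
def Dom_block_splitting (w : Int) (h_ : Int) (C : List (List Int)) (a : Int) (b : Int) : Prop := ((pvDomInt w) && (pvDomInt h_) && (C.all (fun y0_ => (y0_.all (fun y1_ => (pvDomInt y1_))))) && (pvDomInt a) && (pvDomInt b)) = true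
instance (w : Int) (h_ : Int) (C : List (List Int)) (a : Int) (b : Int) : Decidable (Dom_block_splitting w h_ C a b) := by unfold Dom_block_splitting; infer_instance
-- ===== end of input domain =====

-- B pads each block by reads clamped to the image edge (filled column-major) instead of A's
-- branchy neighbour replication that depends on previously filled cells; objective: simpler.
-- Both Pythons are generators; the ports return the list of yielded blocks.

-- math.ceil(x/y) on ints (CPython's float division is exact enough here: for |x|,|y| ≤ 2^31
-- the rounding of x/y cannot cross an integer, so ceil(x/y) = -((-x)//y) exactly)
def pvCeilDiv (x y : Int) : Int := -(PySem.Int.floordiv (-x) y)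

-- C[r][c] (total form; indices in range under Pre_), wrapped in `some`: block cells are Optional
def pvCellGet (C : List (List Int)) (r c : Int) : Option Int :=
  some (PySem.List.pyGetD (PySem.List.pyGetD C r []) c 0)

-- mat[r][c] on the Optional matrix (total form; in range under Pre_)
def pvMatGet (m : List (List (Option Int))) (r c : Int) : Option Int :=
  PySem.List.pyGetD (PySem.List.pyGetD m r []) c none

-- mat[r][c] = v
def pvMatSet (m : List (List (Option Int))) (r c : Int) (v : Option Int) : List (List (Option Int)) :=
  PySem.List.pySetD m r (PySem.List.pySetD (PySem.List.pyGetD m r []) c v)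

-- the init loop both versions share: a rows, each of b Nones
def pvInitMat (a b : Int) : List (List (Option Int)) :=
  (PySem.List.pyRange 0 a 1).foldl
    (fun m _ => m ++ [(PySem.List.pyRange 0 b 1).foldl (fun r _ => r ++ [(none : Option Int)]) []]) []

-- ===== PORT A =====
def block_splitting (w : Int) (h_ : Int) (C : List (List Int)) (a : Int) (b : Int) : List (List (List (Option Int))) :=
  (PySem.List.pyRange 0 (pvCeilDiv h_ b) 1).foldl (fun acc i =>
    (PySem.List.pyRange 0 (pvCeilDiv w a) 1).foldl (fun acc j =>
      let mat0 := pvInitMat a b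
      let mat1 := (PySem.List.pyRange (b*i) (b*(i+1)) 1).foldl (fun mat row =>
        (PySem.List.pyRange (a*j) (a*(j+1)) 1).foldl (fun mat col =>
          if row < h_ ∧ col < w then
            pvMatSet mat (row - b*i) (col - a*j) (pvCellGet C row col)
          else if w ≤ col ∧ row < h_ then
            pvMatSet mat (row - b*i) (col - a*j) (pvMatGet mat (row - b*i) (col - a*j - 1))
          else
            pvMatSet mat (row - b*i) (col - a*j) (pvMatGet mat (row - b*i - 1) (col - a*j))) mat) mat0
      acc ++ [mat1]) acc) []

-- ===== PORT B =====
def block_splitting_alt (w : Int) (h_ : Int) (C : List (List Int)) (a : Int) (b : Int) : List (List (List (Option Int))) :=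
  (PySem.List.pyRange 0 (pvCeilDiv h_ b) 1).foldl (fun acc i =>
    (PySem.List.pyRange 0 (pvCeilDiv w a) 1).foldl (fun acc j =>
      let mat0 := pvInitMat a b
      let mat1 := (PySem.List.pyRange 0 a 1).foldl (fun mat c =>
        (PySem.List.pyRange 0 b 1).foldl (fun mat r =>
          pvMatSet mat r c (pvCellGet C (min (b*i + r) (h_ - 1)) (min (a*j + c) (w - 1)))) mat) mat0
      acc ++ [mat1]) acc) []

-- ===== PRECONDITION & SPEC =====
-- Pre_ is exactly where the Python A returns: b ≠ 0 (else ZeroDivisionError), a ≠ 0 once the outer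
-- loop runs, and when both loop counts are positive with a,b > 0 the fill indexes mat and C, which
-- needs a = b (else IndexError on mat) and C to hold ≥ h_ rows whose first h_ have length ≥ w.
def Pre_block_splitting (w : Int) (h_ : Int) (C : List (List Int)) (a : Int) (b : Int) : Prop :=
  b ≠ 0 ∧ (pvCeilDiv h_ b ≤ 0 ∨ (a ≠ 0 ∧ (pvCeilDiv w a ≤ 0 ∨ b < 0 ∨ a < 0 ∨
    (a = b ∧ h_ ≤ C.length ∧ ∀ row ∈ C.take h_.toNat, w ≤ row.length))))
instance (w : Int) (h_ : Int) (C : List (List Int)) (a : Int) (b : Int) : Decidable (Pre_block_splitting w h_ C a b) := by unfold Pre_block_splitting; infer_instance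

def pvWitness_block_splitting : Int × Int × List (List Int) × Int × Int :=
  (3, 3, [[1,2,3],[4,5,6],[7,8,9]], 2, 2)

def Spec_block_splitting (w : Int) (h_ : Int) (C : List (List Int)) (a : Int) (b : Int) (out : List (List (List (Option Int)))) : Prop := out = block_splitting_alt w h_ C a b
instance (w : Int) (h_ : Int) (C : List (List Int)) (a : Int) (b : Int) (out : List (List (List (Option Int)))) : Decidable (Spec_block_splitting w h_ C a b out) := by unfold Spec_block_splitting; infer_instance

-- ===== CLAIM (what is proved, stated in full; the proofs are below) =====
def Claim_equal_block_splitting : Prop := ∀ (w : Int) (h_ : Int) (C : List (List Int)) (a : Int) (b : Int), Dom_block_splitting w h_ C a b → Pre_block_splitting w h_ C a b → Spec_block_splitting w h_ C a b (block_splitting w h_ C a b)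

-- ===== LEMMAS AND PROOFS =====

-- a matrix materialised from a coordinate function
def pvMk (K : Nat) (f : Nat → Nat → Option Int) : List (List (Option Int)) :=
  (List.range K).map (fun r => (List.range K).map (f r))

-- the value B writes at offset (r, c) of block (i, j): edge-clamped read from C
def pvVal (w h_ : Int) (C : List (List Int)) (a b i j : Int) (r c : Nat) : Option Int :=
  pvCellGet C (min (b*i + (r : Int)) (h_ - 1)) (min (a*j + (c : Int)) (w - 1))

theorem pvMk_congr {K : Nat} {f g : Nat → Nat → Option Int}
    (h : ∀ r < K, ∀ c < K, f r c = g r c) : pvMk K f = pvMk K g := by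
  unfold pvMk
  refine List.map_congr_left (fun r hr => List.map_congr_left (fun c hc => ?_))
  exact h r (List.mem_range.mp hr) c (List.mem_range.mp hc)

theorem pv_getD_map_range {α : Type} (g : Nat → α) {K r : Nat} (hr : r < K) (d : α) :
    ((List.range K).map g).getD r d = g r := by simp [List.getD, hr]

theorem pv_set_map_range {α : Type} (g : Nat → α) {K r : Nat} (hr : r < K) (y : α) :
    ((List.range K).map g).set r y = (List.range K).map (fun t => if t = r then y else g t) := by
  apply List.ext_getElem
  · simp
  · intro n h1 h2
    by_cases h : n = r
    · subst h; simp
    · simp [h, Ne.symm h]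

theorem pvMatGet_mk (K : Nat) (f : Nat → Nat → Option Int) (r c : Nat) (hr : r < K) (hc : c < K) :
    pvMatGet (pvMk K f) (r : Int) (c : Int) = f r c := by
  unfold pvMatGet pvMk
  rw [PySem.List.pyGetD_natCast, PySem.List.pyGetD_natCast]
  rw [pv_getD_map_range _ hr, pv_getD_map_range _ hc]

theorem pvMatSet_mk (K : Nat) (f : Nat → Nat → Option Int) (r c : Nat) (hr : r < K) (hc : c < K) (y : Option Int) :
    pvMatSet (pvMk K f) (r : Int) (c : Int) y
      = pvMk K (fun r' c' => if r' = r ∧ c' = c then y else f r' c') := by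
  unfold pvMatSet pvMk
  rw [PySem.List.pyGetD_natCast, PySem.List.pySetD_natCast, PySem.List.pySetD_natCast]
  rw [pv_getD_map_range _ hr, pv_set_map_range _ hc, pv_set_map_range _ hr]
  refine List.map_congr_left (fun r' hr' => ?_)
  by_cases h1 : r' = r
  · subst h1
    rw [if_pos rfl]
    refine List.map_congr_left (fun c' hc' => ?_)
    by_cases h2 : c' = c <;> simp [h2]
  · simp [h1]

theorem pvInitMat_mk (a b : Int) (hab : a = b) (hb : 0 ≤ b) :
    pvInitMat a b = pvMk b.toNat (fun _ _ => none) := by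
  subst hab
  unfold pvInitMat pvMk
  rw [PySem.List.foldl_append_singleton_eq_map (f := fun _ => (PySem.List.pyRange 0 a 1).foldl (fun r _ => r ++ [(none : Option Int)]) [])]
  rw [PySem.List.foldl_append_singleton_eq_map (f := fun _ => (none : Option Int))]
  simp [PySem.List.pyRange_one, Function.comp_def, List.map_const']

theorem pv_foldl_pyRange_shift {σ : Type} (g : σ → Int → σ) (lo len : Int) (init : σ) :
    (PySem.List.pyRange lo (lo + len) 1).foldl g init
      = (List.range len.toNat).foldl (fun s (k : Nat) => g s (lo + (k : Int))) init := by
  rw [PySem.List.pyRange_one, show lo + len - lo = len from by ring, List.foldl_map]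

theorem pv_foldl_pyRange_zero {σ : Type} (g : σ → Int → σ) (len : Int) (init : σ) :
    (PySem.List.pyRange 0 len 1).foldl g init
      = (List.range len.toNat).foldl (fun s (k : Nat) => g s (k : Int)) init := by
  rw [PySem.List.pyRange_one, List.foldl_map]
  simp only [zero_add, sub_zero]

-- generic loop-invariant engine for a fold over List.range
theorem pv_foldl_range_inv {σ : Type} (g : σ → Nat → σ) (S : Nat → σ) (K : Nat)
    (h : ∀ c < K, g (S c) c = S (c + 1)) : (List.range K).foldl g (S 0) = S K := by
  induction K with
  | zero => rfl
  | succ n ih =>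
    rw [List.range_succ, List.foldl_append]
    rw [ih (fun c hc => h c (Nat.lt_succ_of_lt hc))]
    simpa using h n (Nat.lt_succ_self n)

-- q < ceil(x/y) means y*q < x (for y > 0): the loop indices stay strictly inside the image
theorem pv_ceil_bracket (x y q : Int) (hy : 0 < y) (hq : q < -(PySem.Int.floordiv (-x) y)) :
    y * q < x := by
  have h := (PySem.Int.floordiv_eq_iff_of_pos hy (a := -x) (q := PySem.Int.floordiv (-x) y)).mp rfl
  nlinarith [h.1, h.2]

-- A's fill of block (i, j) produces the edge-clamped block
theorem pv_blockA_eq (w h_ : Int) (C : List (List Int)) (a b i j : Int)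
    (hb : 0 < b) (hab : a = b) (hi : b*i < h_) (hj : a*j < w) :
    (PySem.List.pyRange (b*i) (b*(i+1)) 1).foldl (fun mat row =>
        (PySem.List.pyRange (a*j) (a*(j+1)) 1).foldl (fun mat col =>
          if row < h_ ∧ col < w then
            pvMatSet mat (row - b*i) (col - a*j) (pvCellGet C row col)
          else if w ≤ col ∧ row < h_ then
            pvMatSet mat (row - b*i) (col - a*j) (pvMatGet mat (row - b*i) (col - a*j - 1))
          else
            pvMatSet mat (row - b*i) (col - a*j) (pvMatGet mat (row - b*i - 1) (col - a*j))) mat)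
      (pvInitMat a b)
      = pvMk b.toNat (pvVal w h_ C a b i j) := by
  subst hab
  simp only [show a*(i+1) = a*i + a from by ring, show a*(j+1) = a*j + a from by ring]
  rw [pv_foldl_pyRange_shift, pvInitMat_mk a a rfl (by omega)]
  rw [show pvMk a.toNat (fun _ _ => none)
        = pvMk a.toNat (fun r' c' => if r' < 0 then pvVal w h_ C a a i j r' c' else none) from
      pvMk_congr (by intro r _ c _; simp)]
  refine (pv_foldl_range_inv _
      (fun r => pvMk a.toNat (fun r' c' => if r' < r then pvVal w h_ C a a i j r' c' else none))
      a.toNat ?_).trans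
    (pvMk_congr (fun r' hr' c' hc' => if_pos hr'))
  intro r hrK
  beta_reduce
  rw [pv_foldl_pyRange_shift]
  rw [show pvMk a.toNat (fun r' c' => if r' < r then pvVal w h_ C a a i j r' c' else none)
        = pvMk a.toNat (fun r' c' => if r' < r ∨ (r' = r ∧ c' < 0) then pvVal w h_ C a a i j r' c' else none) from
      pvMk_congr (fun r' hr' c' hc' => if_congr (by omega) rfl rfl)]
  refine (pv_foldl_range_inv _
      (fun c => pvMk a.toNat (fun r' c' => if r' < r ∨ (r' = r ∧ c' < c) then pvVal w h_ C a a i j r' c' else none))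
      a.toNat ?_).trans
    (pvMk_congr (fun r' hr' c' hc' => if_congr (by omega) rfl rfl))
  intro c hcK
  beta_reduce
  rw [show (a*i + (r:Int)) - a*i = (r:Int) from by ring,
      show (a*j + (c:Int)) - a*j = (c:Int) from by ring]
  by_cases h1 : a*i + (r:Int) < h_ ∧ a*j + (c:Int) < w
  · rw [if_pos h1, pvMatSet_mk a.toNat _ r c hrK hcK]
    refine pvMk_congr (fun r' hr' c' hc' => ?_)
    by_cases he : r' = r ∧ c' = c
    · obtain ⟨e1, e2⟩ := he; subst e1; subst e2
      rw [if_pos ⟨rfl, rfl⟩, if_pos (by omega)]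
      unfold pvVal
      rw [min_eq_left (by omega), min_eq_left (by omega)]
    · rw [if_neg he]
      exact if_congr (by omega) rfl rfl
  · rw [if_neg h1]
    by_cases h2 : w ≤ a*j + (c:Int) ∧ a*i + (r:Int) < h_
    · rw [if_pos h2]
      have hc1 : 1 ≤ c := by omega
      rw [show (c:Int) - 1 = ((c - 1 : Nat) : Int) from by omega]
      rw [pvMatGet_mk a.toNat _ r (c-1) hrK (by omega)]
      rw [if_pos (show r < r ∨ (r = r ∧ c - 1 < c) from by omega)]
      rw [pvMatSet_mk a.toNat _ r c hrK hcK]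
      refine pvMk_congr (fun r' hr' c' hc' => ?_)
      by_cases he : r' = r ∧ c' = c
      · obtain ⟨e1, e2⟩ := he; subst e1; subst e2
        rw [if_pos ⟨rfl, rfl⟩, if_pos (by omega)]
        unfold pvVal
        rw [show min (a*j + ((c' - 1 : Nat) : Int)) (w - 1) = min (a*j + (c' : Int)) (w - 1) from by omega]
      · rw [if_neg he]
        exact if_congr (by omega) rfl rfl
    · rw [if_neg h2]
      have hrow : h_ ≤ a*i + (r:Int) := by omega
      have hr1 : 1 ≤ r := by omega
      rw [show (r:Int) - 1 = ((r - 1 : Nat) : Int) from by omega]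
      rw [pvMatGet_mk a.toNat _ (r-1) c (by omega) hcK]
      rw [if_pos (show r - 1 < r ∨ (r - 1 = r ∧ c < c) from by omega)]
      rw [pvMatSet_mk a.toNat _ r c hrK hcK]
      refine pvMk_congr (fun r' hr' c' hc' => ?_)
      by_cases he : r' = r ∧ c' = c
      · obtain ⟨e1, e2⟩ := he; subst e1; subst e2
        rw [if_pos ⟨rfl, rfl⟩, if_pos (by omega)]
        unfold pvVal
        rw [show min (a*i + ((r' - 1 : Nat) : Int)) (h_ - 1) = min (a*i + (r' : Int)) (h_ - 1) from by omega]
      · rw [if_neg he]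
        exact if_congr (by omega) rfl rfl

-- B's fill of block (i, j) produces the same edge-clamped block
theorem pv_blockB_eq (w h_ : Int) (C : List (List Int)) (a b i j : Int)
    (hb : 0 < b) (hab : a = b) :
    (PySem.List.pyRange 0 a 1).foldl (fun mat c =>
        (PySem.List.pyRange 0 b 1).foldl (fun mat r =>
          pvMatSet mat r c (pvCellGet C (min (b*i + r) (h_ - 1)) (min (a*j + c) (w - 1)))) mat)
      (pvInitMat a b)
      = pvMk b.toNat (pvVal w h_ C a b i j) := by
  subst hab
  rw [pv_foldl_pyRange_zero, pvInitMat_mk a a rfl (by omega)]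
  rw [show pvMk a.toNat (fun _ _ => none)
        = pvMk a.toNat (fun r' c' => if c' < 0 then pvVal w h_ C a a i j r' c' else none) from
      pvMk_congr (by intro r _ c _; simp)]
  refine (pv_foldl_range_inv _
      (fun c => pvMk a.toNat (fun r' c' => if c' < c then pvVal w h_ C a a i j r' c' else none))
      a.toNat ?_).trans
    (pvMk_congr (fun r' hr' c' hc' => if_pos hc'))
  intro c hcK
  beta_reduce
  rw [pv_foldl_pyRange_zero]
  rw [show pvMk a.toNat (fun r' c' => if c' < c then pvVal w h_ C a a i j r' c' else none)
        = pvMk a.toNat (fun r' c' => if c' < c ∨ (c' = c ∧ r' < 0) then pvVal w h_ C a a i j r' c' else none) from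
      pvMk_congr (fun r' hr' c' hc' => if_congr (by omega) rfl rfl)]
  refine (pv_foldl_range_inv _
      (fun r => pvMk a.toNat (fun r' c' => if c' < c ∨ (c' = c ∧ r' < r) then pvVal w h_ C a a i j r' c' else none))
      a.toNat ?_).trans
    (pvMk_congr (fun r' hr' c' hc' => if_congr (by omega) rfl rfl))
  intro r hrK
  beta_reduce
  rw [pvMatSet_mk a.toNat _ r c hrK hcK]
  refine pvMk_congr (fun r' hr' c' hc' => ?_)
  by_cases he : r' = r ∧ c' = c
  · obtain ⟨e1, e2⟩ := he; subst e1; subst e2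
    rw [if_pos ⟨rfl, rfl⟩, if_pos (by omega)]
    rfl
  · rw [if_neg he]
    exact if_congr (by omega) rfl rfl

-- degenerate blocks: a negative size leaves the init matrix untouched on both sides
theorem pv_blockA_b_neg (w h_ : Int) (C : List (List Int)) (a b i j : Int) (hb : b < 0) :
    (PySem.List.pyRange (b*i) (b*(i+1)) 1).foldl (fun mat row =>
        (PySem.List.pyRange (a*j) (a*(j+1)) 1).foldl (fun mat col =>
          if row < h_ ∧ col < w then
            pvMatSet mat (row - b*i) (col - a*j) (pvCellGet C row col)
          else if w ≤ col ∧ row < h_ then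
            pvMatSet mat (row - b*i) (col - a*j) (pvMatGet mat (row - b*i) (col - a*j - 1))
          else
            pvMatSet mat (row - b*i) (col - a*j) (pvMatGet mat (row - b*i - 1) (col - a*j))) mat)
      (pvInitMat a b) = pvInitMat a b := by
  rw [PySem.List.pyRange_one_eq_nil (show b*(i+1) ≤ b*i from by
    have : b*(i+1) = b*i + b := by ring
    omega)]
  rfl

theorem pv_blockA_a_neg (w h_ : Int) (C : List (List Int)) (a b i j : Int) (ha : a < 0) :
    (PySem.List.pyRange (b*i) (b*(i+1)) 1).foldl (fun mat row =>
        (PySem.List.pyRange (a*j) (a*(j+1)) 1).foldl (fun mat col =>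
          if row < h_ ∧ col < w then
            pvMatSet mat (row - b*i) (col - a*j) (pvCellGet C row col)
          else if w ≤ col ∧ row < h_ then
            pvMatSet mat (row - b*i) (col - a*j) (pvMatGet mat (row - b*i) (col - a*j - 1))
          else
            pvMatSet mat (row - b*i) (col - a*j) (pvMatGet mat (row - b*i - 1) (col - a*j))) mat)
      (pvInitMat a b) = pvInitMat a b := by
  have hnil : PySem.List.pyRange (a*j) (a*(j+1)) 1 = [] :=
    PySem.List.pyRange_one_eq_nil (by
      have : a*(j+1) = a*j + a := by ring
      omega)
  simp only [hnil, List.foldl_nil, PySem.List.foldl_ignore]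

theorem pv_blockB_b_neg (w h_ : Int) (C : List (List Int)) (a b i j : Int) (hb : b < 0) :
    (PySem.List.pyRange 0 a 1).foldl (fun mat c =>
        (PySem.List.pyRange 0 b 1).foldl (fun mat r =>
          pvMatSet mat r c (pvCellGet C (min (b*i + r) (h_ - 1)) (min (a*j + c) (w - 1)))) mat)
      (pvInitMat a b) = pvInitMat a b := by
  have hnil : PySem.List.pyRange 0 b 1 = [] := PySem.List.pyRange_one_eq_nil (by omega)
  simp only [hnil, List.foldl_nil, PySem.List.foldl_ignore]

theorem pv_blockB_a_neg (w h_ : Int) (C : List (List Int)) (a b i j : Int) (ha : a < 0) :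
    (PySem.List.pyRange 0 a 1).foldl (fun mat c =>
        (PySem.List.pyRange 0 b 1).foldl (fun mat r =>
          pvMatSet mat r c (pvCellGet C (min (b*i + r) (h_ - 1)) (min (a*j + c) (w - 1)))) mat)
      (pvInitMat a b) = pvInitMat a b := by
  rw [PySem.List.pyRange_one_eq_nil (by omega : a ≤ (0:Int))]
  rfl

-- ===== VERDICT (by name: the statement is the Claim_ definition above) =====
theorem block_splitting_spec : Claim_equal_block_splitting := by
  intro w h_ C a b hdom hpre
  unfold Spec_block_splitting
  obtain ⟨hb0, hpre2⟩ := hpre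
  by_cases hni : pvCeilDiv h_ b ≤ 0
  · simp only [block_splitting, block_splitting_alt,
      PySem.List.pyRange_one_eq_nil hni, List.foldl_nil]
  · simp only [block_splitting, block_splitting_alt,
      PySem.List.foldl_append_singleton_eq_map, PySem.List.foldl_append_eq_flatMap,
      List.nil_append]
    refine List.flatMap_congr ?_
    intro i hi
    refine List.map_congr_left (fun j hj => ?_)
    rw [PySem.List.mem_pyRange_one] at hi hj
    rcases hpre2 with hcd | ⟨ha0, hrest⟩
    · omega
    rcases hrest with hcw | hbneg | haneg | ⟨hab, hshape⟩
    · omega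
    · rw [pv_blockA_b_neg w h_ C a b i j hbneg, pv_blockB_b_neg w h_ C a b i j hbneg]
    · rw [pv_blockA_a_neg w h_ C a b i j haneg, pv_blockB_a_neg w h_ C a b i j haneg]
    · rcases lt_or_gt_of_ne hb0 with hblt | hbgt
      · rw [pv_blockA_b_neg w h_ C a b i j hblt, pv_blockB_b_neg w h_ C a b i j hblt]
      · have hi' : b * i < h_ := pv_ceil_bracket h_ b i hbgt hi.2
        have hj' : a * j < w := pv_ceil_bracket w a j (by omega) hj.2
        rw [pv_blockA_eq w h_ C a b i j hbgt hab hi' hj', pv_blockB_eq w h_ C a b i j hbgt hab]
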